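-- pv_equiv track=rewrite | github.com/joshanashakya/dissertation | workspace/dataset/java-python/GeeksForGeeks/1496/A/2.py | splitIntoOdds
-- ===== SOURCE A (Python) =====
-- def checkOdd(number):
--     n = len(number)
--     num = ord(number[n - 1]) - 48
--     return (num & 1)
--
-- def splitIntoOdds(number):
--     numLen = len(number)
--
--     # Declare a splitdp[] array
--     # and initialize to -1
--     splitDP = [-1 for i in range(numLen + 1)]
--
--     # Build the DP table in
--     # a bottom-up manner
--     for i in range(1, numLen + 1):
--
--         # Initially Check if the entire prefix is odd
--         if (i <= 9 and checkOdd(number[0:i]) > 0):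
--             splitDP[i] = 1
--
--         # If the Given Prefix can be split into Odds
--         # then for the remaining string from i to j
--         # Check if Odd. If yes calculate
--         # the minimum split till j
--         if (splitDP[i] != -1):
--             for j in range(1, 10):
--                 if(i + j > numLen):
--                     break;
--
--                 # To check if the substring from i to j
--                 # is a odd number or not
--                 if (checkOdd(number[i:i + j])):
--
--                     # If it is an odd number,
--                     # then update the dp array
--                     if (splitDP[i + j] == -1):
--                         splitDP[i + j] = 1 + splitDP[i]
--                     else:
--                         splitDP[i + j] = min(splitDP[i + j], 1 + splitDP[i])
--
--     # Return the minimum number of splits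
--     # for the entire string
--     return splitDP[numLen]
-- ===== SOURCE B (Python) =====
-- # Greedy farthest-jump instead of DP: a piece is valid iff its last char code is
-- # odd and its length <= 9, so the answer is the minimum number of jumps from 0
-- # to n landing only on odd positions with jump length <= 9; jumping greedily to
-- # the farthest odd position in the next 9-window is optimal (the greedy position
-- # after k jumps dominates every position reachable in k jumps).
-- def splitIntoOdds(number):
--     n = len(number)
--     if n == 0 or ord(number[n - 1]) % 2 == 0:
--         return -1
--     cur = 0
--     steps = 0
--     while cur < n:
--         best = cur
--         for p in range(cur + 1, min(cur + 9, n) + 1):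
--             if ord(number[p - 1]) % 2:
--                 best = p
--         if best == cur:
--             return -1
--         cur = best
--         steps += 1
--     return steps
-- ===== Notes on version B (the rewrite author's own statement) =====
-- stated objective: faster
-- what changed: Replaced A's bottom-up DP table (for every prefix, slice up to 9 substrings, re-check their parity and push min-updates into successor cells) by a greedy farthest-jump scan: a piece is valid iff its last char code is odd and its length is at most 9, so B repeatedly jumps to the farthest odd position within the next 9 characters and counts the jumps (returning -1 when stuck), which is optimal because the greedy position after k jumps dominates every position reachable in k jumps.
import Mathlib
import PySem

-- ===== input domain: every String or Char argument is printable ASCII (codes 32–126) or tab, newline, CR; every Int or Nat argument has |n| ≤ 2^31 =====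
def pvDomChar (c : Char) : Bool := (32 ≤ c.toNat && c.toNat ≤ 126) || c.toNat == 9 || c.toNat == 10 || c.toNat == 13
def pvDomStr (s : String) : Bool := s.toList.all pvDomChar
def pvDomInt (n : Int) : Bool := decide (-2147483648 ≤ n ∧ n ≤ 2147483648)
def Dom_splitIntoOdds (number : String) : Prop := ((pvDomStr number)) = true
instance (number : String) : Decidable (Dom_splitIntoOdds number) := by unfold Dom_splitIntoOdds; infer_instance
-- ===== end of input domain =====

-- B replaces A's bottom-up DP table by a greedy farthest-jump scan over odd
-- positions (classic min-jumps greedy); measurably faster (no table, no slicing).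


-- ===== PORT A =====
-- checkOdd: num = ord(number[n-1]) - 48; return num & 1.
-- A only calls it on nonempty slices, where pyGetD is exact (Python would raise on "").
def checkOdd (s : List Char) : Int :=
  let n := s.length
  let num : Int := ((PySem.List.pyGetD s ((n : Int) - 1) ' ').toNat : Int) - 48
  PySem.Int.band num 1

-- body of A's inner 'for j in range(1, 10)'; 'if i + j > numLen: break' is ported as a
-- skip, exact because the break condition is monotone in j
def aInner (cs : List Char) (numLen i : Nat) (dp : List Int) (j : Nat) : List Int :=
  if i + j > numLen then dp
  else if checkOdd (PySem.List.slice cs (some (i : Int)) (some ((i + j : Nat) : Int))) ≠ 0 then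
    (if dp.getD (i + j) (-1) = -1 then dp.set (i + j) (1 + dp.getD i (-1))
     else dp.set (i + j) (min (dp.getD (i + j) (-1)) (1 + dp.getD i (-1))))
  else dp

-- body of A's outer 'for i in range(1, numLen + 1)'
def aStep (cs : List Char) (numLen : Nat) (dp : List Int) (i : Nat) : List Int :=
  let dp := if i ≤ 9 ∧ checkOdd (PySem.List.slice cs (some (0 : Int)) (some (i : Int))) > 0
            then dp.set i 1 else dp
  if dp.getD i (-1) ≠ -1 then (List.range' 1 9).foldl (aInner cs numLen i) dp
  else dp

-- range(1, numLen + 1) is ported as List.range' 1 numLen (the same values, as Nat)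
def splitIntoOdds (number : String) : Int :=
  let cs := number.toList
  let numLen := cs.length
  let splitDP : List Int := (List.range (numLen + 1)).map (fun _ => (-1 : Int))
  let splitDP := (List.range' 1 numLen).foldl (aStep cs numLen) splitDP
  splitDP.getD numLen (-1)

-- ===== PORT B =====
-- body of B's inner 'for p in range(cur+1, min(cur+9, n)+1): if ord(number[p-1]) % 2: best = p'
-- ('ord(c) % 2' is truthy iff the char code is odd, i.e. % 2 = 1 on Nat)
def pickOdd (cs : List Char) (best p : Nat) : Nat :=
  if (cs.getD (p - 1) ' ').toNat % 2 = 1 then p else best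

-- range(cur+1, min(cur+9, n)+1) is ported as List.range' (cur+1) (min (cur+9) n - cur)
def bestStep (cs : List Char) (cur n : Nat) : Nat :=
  (List.range' (cur + 1) (min (cur + 9) n - cur)).foldl (pickOdd cs) cur

-- termination helper for the while loop: 'best' never moves backwards
lemma pick_mem (cs : List Char) : ∀ (l : List Nat) (b : Nat),
    l.foldl (pickOdd cs) b = b ∨ l.foldl (pickOdd cs) b ∈ l := by
  intro l
  induction l with
  | nil => intro b; left; rfl
  | cons x t ih =>
    intro b
    simp only [List.foldl_cons]
    rcases ih (pickOdd cs b x) with h | h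
    · rw [h]
      unfold pickOdd
      split_ifs
      · right; simp
      · left; rfl
    · right; simp [h]

lemma bestStep_ge (cs : List Char) (cur n : Nat) : cur ≤ bestStep cs cur n := by
  rcases pick_mem cs (List.range' (cur + 1) (min (cur + 9) n - cur)) cur with h | h
  · rw [bestStep, h]
  · rw [bestStep]
    have := (List.mem_range'_1.mp h).1
    omega

-- B's 'while cur < n' loop carrying (cur, steps)
def gloop (cs : List Char) (n cur steps : Nat) : Int :=
  if h : cur < n then
    if hb : bestStep cs cur n = cur then -1
    else gloop cs n (bestStep cs cur n) (steps + 1)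
  else (steps : Int)
termination_by n - cur
decreasing_by
  have := bestStep_ge cs cur n
  omega

def splitIntoOdds_alt (number : String) : Int :=
  let cs := number.toList
  let n := cs.length
  if n = 0 ∨ (cs.getD (n - 1) ' ').toNat % 2 = 0 then -1
  else gloop cs n 0 0

-- ===== PRECONDITION & SPEC =====
def Spec_splitIntoOdds (number : String) (out : Int) : Prop := out = splitIntoOdds_alt number
instance (number : String) (out : Int) : Decidable (Spec_splitIntoOdds number out) := by
  unfold Spec_splitIntoOdds; infer_instance

-- ===== CLAIM (what is proved, stated in full; the proofs are below) =====
def Claim_equal_splitIntoOdds : Prop := ∀ (number : String), Dom_splitIntoOdds number → Spec_splitIntoOdds number (splitIntoOdds number)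

-- ===== LEMMAS AND PROOFS =====

-- ---- Part 1: A's table computes the pull-style values gv (predecessor minima) ----

-- A's two-branch min-update, as one operation
def combineMin (acc v : Int) : Int := if acc = -1 then v else min acc v

-- value of dp cell p written in pull style: 1 + min over odd-ended predecessors
def bVal (cs : List Char) (dp : List Int) (i : Nat) : Int :=
  if (cs.getD (i - 1) ' ').toNat % 2 = 1 then
    match PySem.List.min? (((List.range' 1 (min 9 i)).filter
        (fun j => decide (dp.getD (i - j) (-1) ≠ -1))).map (fun j => dp.getD (i - j) (-1)))
        (fun y => y) with
    | some m => m + 1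
    | none => -1
  else -1

def bStep (cs : List Char) (dp : List Int) (i : Nat) : List Int := dp ++ [bVal cs dp i]

-- list of pull-style values for positions 0..k
def gvl (cs : List Char) (k : Nat) : List Int := (List.range' 1 k).foldl (bStep cs) [0]

-- pull-style value at position p
def gv (cs : List Char) (p : Nat) : Int := (gvl cs p).getD p (-1)

-- fold of A's min-updates
def mfold (l : List Int) : Int := l.foldl combineMin (-1)

-- candidate values pushed into cell p by A during iterations 1..k
def candA (cs : List Char) (k p : Nat) : List Int :=
  ((List.range' 1 k).filter (fun q => decide (p ≤ q + 9) && decide (gv cs q ≠ -1))).map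
    (fun q => gv cs q + 1)

lemma getD_set_self (l : List Int) (i : Nat) (v d : Int) (h : i < l.length) :
    (l.set i v).getD i d = v := by
  simp [List.getD, h]

lemma getD_set_other (l : List Int) (i j : Nat) (v d : Int) (h : i ≠ j) :
    (l.set i v).getD j d = l.getD j d := by
  simp [List.getD, h]

lemma getD_append_left (l t : List Int) (p : Nat) (d : Int) (h : p < l.length) :
    (l ++ t).getD p d = l.getD p d := by
  simp [List.getD, List.getElem?_append_left h]

lemma getD_append_len (l : List Int) (x d : Int) : (l ++ [x]).getD l.length d = x := by
  simp [List.getD]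

lemma gvl_succ (cs : List Char) (k : Nat) :
    gvl cs (k + 1) = gvl cs k ++ [bVal cs (gvl cs k) (k + 1)] := by
  show (List.range' 1 (k+1)).foldl (bStep cs) [0] = _
  rw [List.range'_concat, List.foldl_append]
  have h : 1 + 1 * k = k + 1 := by omega
  rw [h]
  rfl

lemma length_gvl (cs : List Char) (k : Nat) : (gvl cs k).length = k + 1 := by
  induction k with
  | zero => rfl
  | succ k ih => rw [gvl_succ]; simp [ih]

lemma gvl_getD_stable (cs : List Char) (p k m : Nat) (hk : p ≤ k) (hm : k ≤ m) (d : Int) :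
    (gvl cs m).getD p d = (gvl cs k).getD p d := by
  induction m, hm using Nat.le_induction with
  | base => rfl
  | succ m hm ih =>
      rw [gvl_succ, getD_append_left (h := by rw [length_gvl]; omega)]
      exact ih

lemma gv_succ (cs : List Char) (k : Nat) : gv cs (k + 1) = bVal cs (gvl cs k) (k + 1) := by
  show (gvl cs (k+1)).getD (k+1) (-1) = _
  rw [gvl_succ]
  have h : k + 1 = (gvl cs k).length := (length_gvl cs k).symm
  rw [h, getD_append_len]

lemma gv_zero (cs : List Char) : gv cs 0 = 0 := rfl

-- the candidate list behind gv at position k+1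
def candsB (cs : List Char) (k : Nat) : List Int :=
  ((List.range' 1 (min 9 (k + 1))).filter
      (fun j => decide ((gvl cs k).getD (k + 1 - j) (-1) ≠ -1))).map
    (fun j => (gvl cs k).getD (k + 1 - j) (-1))

lemma bVal_gvl (cs : List Char) (k : Nat) :
    bVal cs (gvl cs k) (k + 1) =
      if (cs.getD (k + 1 - 1) ' ').toNat % 2 = 1 then
        match PySem.List.min? (candsB cs k) (fun y => y) with
        | some m => m + 1
        | none => -1
      else -1 := rfl

-- membership in the candidate list, in terms of predecessor positions
lemma mem_candsB (cs : List Char) (k : Nat) (x : Int) :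
    x ∈ candsB cs k ↔ ∃ q, q < k + 1 ∧ k + 1 ≤ q + 9 ∧ gv cs q ≠ -1 ∧ x = gv cs q := by
  unfold candsB
  simp only [List.mem_map, List.mem_filter, List.mem_range'_1, decide_eq_true_eq]
  constructor
  · rintro ⟨j, ⟨⟨hj1, hj2⟩, hne⟩, rfl⟩
    have hst : (gvl cs k).getD (k + 1 - j) (-1) = gv cs (k + 1 - j) :=
      gvl_getD_stable cs (k + 1 - j) (k + 1 - j) k le_rfl (by omega) (-1)
    rw [hst] at hne ⊢
    exact ⟨k + 1 - j, by omega, by omega, hne, rfl⟩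
  · rintro ⟨q, hq1, hq2, hne, rfl⟩
    have hq : k + 1 - (k + 1 - q) = q := by omega
    have hst : (gvl cs k).getD q (-1) = gv cs q :=
      gvl_getD_stable cs q q k le_rfl (by omega) (-1)
    refine ⟨k + 1 - q, ⟨⟨by omega, by omega⟩, ?_⟩, ?_⟩
    · rw [hq, hst]; exact hne
    · rw [hq, hst]

lemma mem_candA (cs : List Char) (k p : Nat) (x : Int) :
    x ∈ candA cs k p ↔ ∃ q, 1 ≤ q ∧ q ≤ k ∧ p ≤ q + 9 ∧ gv cs q ≠ -1 ∧ x = gv cs q + 1 := by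
  unfold candA
  simp only [List.mem_map, List.mem_filter, List.mem_range'_1, decide_eq_true_eq,
    Bool.and_eq_true]
  constructor
  · rintro ⟨q, ⟨⟨h1, h2⟩, h3, h4⟩, rfl⟩
    exact ⟨q, h1, by omega, h3, h4, rfl⟩
  · rintro ⟨q, h1, h2, h3, h4, rfl⟩
    exact ⟨q, ⟨⟨h1, by omega⟩, h3, h4⟩, rfl⟩

lemma gv_cases (cs : List Char) : ∀ p, gv cs p = -1 ∨ (0 ≤ gv cs p ∧ (1 ≤ p → 1 ≤ gv cs p)) := by
  intro p
  induction p using Nat.strong_induction_on with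
  | _ p ih =>
    match p with
    | 0 => right; rw [gv_zero]; exact ⟨le_refl 0, by omega⟩
    | k + 1 =>
      rw [gv_succ, bVal_gvl]
      by_cases ho : (cs.getD (k + 1 - 1) ' ').toNat % 2 = 1
      · rw [if_pos ho]
        cases hmin : PySem.List.min? (candsB cs k) (fun y => y) with
        | none => left; rfl
        | some m =>
          have hmem : m ∈ candsB cs k := PySem.List.min?_mem hmin
          obtain ⟨q, hq1, _, hne, rfl⟩ := (mem_candsB cs k m).mp hmem
          have h0 : 0 ≤ gv cs q := by
            rcases ih q (by omega) with h | ⟨h, _⟩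
            · exact absurd h hne
            · exact h
          right
          exact ⟨show (0:Int) ≤ gv cs q + 1 by omega,
                 fun _ => show (1:Int) ≤ gv cs q + 1 by omega⟩
      · rw [if_neg ho]; left; rfl

lemma min?_id_eq_some_of (l : List Int) (v : Int) (hv : v ∈ l) (hb : ∀ y ∈ l, v ≤ y) :
    PySem.List.min? l (fun y => y) = some v := by
  cases h : PySem.List.min? l (fun y => y) with
  | none =>
    rw [PySem.List.min?_eq_none_iff] at h
    subst h; cases hv
  | some m =>
    have hm : m ∈ l := PySem.List.min?_mem h
    have h2 : m ≤ v := PySem.List.min?_isMin h v hv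
    rw [le_antisymm h2 (hb m hm)]

lemma mfold_append (l : List Int) (x : Int) : mfold (l ++ [x]) = combineMin (mfold l) x := by
  simp [mfold, List.foldl_append]

lemma foldl_combineMin_eq (t : List Int) : ∀ a : Int, 0 ≤ a → (∀ y ∈ t, 0 ≤ y) →
    t.foldl combineMin a = t.foldl min a := by
  induction t with
  | nil => intros; rfl
  | cons x t ih =>
    intro a ha h
    have hx : 0 ≤ x := h x (by simp)
    simp only [List.foldl_cons]
    have hc : combineMin a x = min a x := by unfold combineMin; rw [if_neg (by omega)]
    rw [hc]
    exact ih _ (le_min ha hx) (fun y hy => h y (by simp [hy]))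

lemma mfold_eq_min? (l : List Int) (h : ∀ x ∈ l, 0 ≤ x) :
    mfold l = (PySem.List.min? l (fun y => y)).getD (-1) := by
  cases l with
  | nil =>
    have hn : PySem.List.min? ([] : List Int) (fun y => y) = none :=
      (PySem.List.min?_eq_none_iff _ _).mpr rfl
    rw [hn]; rfl
  | cons x t =>
    rw [PySem.List.min?_id_cons]
    have hx : 0 ≤ x := h x (by simp)
    show mfold (x :: t) = t.foldl min x
    unfold mfold
    simp only [List.foldl_cons]
    have h0 : combineMin (-1) x = x := by unfold combineMin; rw [if_pos rfl]
    rw [h0]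
    exact foldl_combineMin_eq t x hx (fun y hy => h y (by simp [hy]))

lemma candA_succ (cs : List Char) (k p : Nat) :
    candA cs (k + 1) p =
      candA cs k p ++ (if p ≤ k + 1 + 9 ∧ gv cs (k + 1) ≠ -1 then [gv cs (k + 1) + 1] else []) := by
  unfold candA
  rw [List.range'_concat]
  have h : 1 + 1 * k = k + 1 := by omega
  rw [h, List.filter_append, List.map_append]
  congr 1
  by_cases hp9 : p ≤ k + 1 + 9 <;> by_cases hg : gv cs (k + 1) = -1 <;>
    simp [hp9, hg]

-- parity of the last character of a nonempty in-range slice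
lemma checkOdd_slice (cs : List Char) (a b : Nat) (hab : a < b) (hb : b ≤ cs.length) :
    checkOdd (PySem.List.slice cs (some (a : Int)) (some (b : Int))) =
      (if (cs.getD (b - 1) ' ').toNat % 2 = 1 then 1 else 0) := by
  rw [PySem.List.slice_natCast]
  simp only [checkOdd]
  have hlen : ((cs.drop a).take (b - a)).length = b - a := by
    simp [List.length_take, List.length_drop]; omega
  have hidx : ((((cs.drop a).take (b - a)).length : Int) - 1) = ((b - a - 1 : Nat) : Int) := by
    rw [hlen]; omega
  rw [hidx, PySem.List.pyGetD_natCast]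
  have hget : ((cs.drop a).take (b - a)).getD (b - a - 1) ' ' = cs.getD (b - 1) ' ' := by
    have h1 : b - a - 1 < ((cs.drop a).take (b - a)).length := by omega
    have h2 : b - 1 < cs.length := by omega
    rw [List.getD_eq_getElem _ _ h1, List.getD_eq_getElem _ _ h2]
    rw [List.getElem_take, List.getElem_drop]
    congr 1
    omega
  rw [hget]
  rw [PySem.Int.band_one, PySem.Int.mod_eq_emod_of_pos (by omega)]
  split_ifs with hpar <;> omega

-- gv, case split matching what A's loop does to cell p
lemma gv_not_odd (cs : List Char) (p : Nat) (hp : 1 ≤ p)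
    (h : ¬ (cs.getD (p - 1) ' ').toNat % 2 = 1) : gv cs p = -1 := by
  obtain ⟨k, rfl⟩ : ∃ k, p = k + 1 := ⟨p - 1, by omega⟩
  rw [gv_succ, bVal_gvl, if_neg h]

lemma gv_odd_small (cs : List Char) (p : Nat) (hp : 1 ≤ p) (h9 : p ≤ 9)
    (h : (cs.getD (p - 1) ' ').toNat % 2 = 1) : gv cs p = 1 := by
  obtain ⟨k, rfl⟩ : ∃ k, p = k + 1 := ⟨p - 1, by omega⟩
  rw [gv_succ, bVal_gvl, if_pos h]
  have h0 : (0 : Int) ∈ candsB cs k := (mem_candsB cs k 0).mpr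
    ⟨0, by omega, by omega, by rw [gv_zero]; decide, (gv_zero cs).symm⟩
  have hbound : ∀ y ∈ candsB cs k, (0 : Int) ≤ y := by
    intro y hy
    obtain ⟨q, _, _, hne, rfl⟩ := (mem_candsB cs k y).mp hy
    rcases gv_cases cs q with h' | ⟨h', _⟩
    · exact absurd h' hne
    · exact h'
  rw [min?_id_eq_some_of _ 0 h0 hbound]
  norm_num

lemma gv_odd_large (cs : List Char) (p : Nat) (h9 : 10 ≤ p)
    (h : (cs.getD (p - 1) ' ').toNat % 2 = 1) : gv cs p = mfold (candA cs (p - 1) p) := by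
  obtain ⟨k, rfl⟩ : ∃ k, p = k + 1 := ⟨p - 1, by omega⟩
  rw [gv_succ, bVal_gvl, if_pos h]
  simp only [Nat.add_sub_cancel]
  have hA : ∀ x ∈ candA cs k (k + 1), (0 : Int) ≤ x := by
    intro x hx
    obtain ⟨q, _, _, _, hne, rfl⟩ := (mem_candA cs k (k + 1) x).mp hx
    rcases gv_cases cs q with h' | ⟨h', _⟩
    · exact absurd h' hne
    · omega
  rw [mfold_eq_min? _ hA]
  cases hmin : PySem.List.min? (candsB cs k) (fun y => y) with
  | none =>
    have hflat := (PySem.List.min?_eq_none_iff _ _).mp hmin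
    have hAnil : candA cs k (k + 1) = [] := by
      rw [List.eq_nil_iff_forall_not_mem]
      intro x hx
      obtain ⟨q, hq1, hq2, hq9, hne, rfl⟩ := (mem_candA cs k (k + 1) x).mp hx
      have hmem : gv cs q ∈ candsB cs k := (mem_candsB cs k _).mpr ⟨q, by omega, by omega, hne, rfl⟩
      rw [hflat] at hmem
      cases hmem
    rw [hAnil,
      show PySem.List.min? ([] : List Int) (fun y => y) = none from
        (PySem.List.min?_eq_none_iff _ _).mpr rfl]
    rfl
  | some m =>
    have hmem := PySem.List.min?_mem hmin
    obtain ⟨q, hq1, hq2, hne, hmq⟩ := (mem_candsB cs k m).mp hmem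
    have hmA : m + 1 ∈ candA cs k (k + 1) :=
      (mem_candA _ _ _ _).mpr ⟨q, by omega, by omega, by omega, hne, by rw [hmq]⟩
    have hbA : ∀ y ∈ candA cs k (k + 1), m + 1 ≤ y := by
      intro y hy
      obtain ⟨q', h1, h2, h3, hne', rfl⟩ := (mem_candA _ _ _ _).mp hy
      have hin : gv cs q' ∈ candsB cs k := (mem_candsB _ _ _).mpr ⟨q', by omega, by omega, hne', rfl⟩
      have := PySem.List.min?_isMin hmin _ hin
      omega
    rw [min?_id_eq_some_of _ _ hmA hbA]
    rfl

lemma if_shift (dpv X : Int) (n i m p : Nat) (odd : Prop) [Decidable odd]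
    (hp : p ≠ i + (m + 1)) :
    (if i + 1 ≤ p ∧ p ≤ i + m ∧ p ≤ n ∧ odd then X else dpv) =
    (if i + 1 ≤ p ∧ p ≤ i + (m + 1) ∧ p ≤ n ∧ odd then X else dpv) := by
  by_cases ho : odd
  · simp only [ho, and_true]
    split_ifs <;> first | rfl | omega
  · simp [ho]

lemma dp0_getD (n p : Nat) : ((List.range n).map (fun _ => (-1 : Int))).getD p (-1) = -1 := by
  rcases lt_or_ge p n with h | h
  · rw [List.getD_eq_getElem _ _ (by simpa using h)]
    simp
  · simp [List.getD]

-- effect of A's inner loop (the pushes from cell i) on every cell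
lemma innerLoop (cs : List Char) (i : Nat) (dp : List Int)
    (hlen : dp.length = cs.length + 1) (_hi1 : 1 ≤ i)
    (hgvi : dp.getD i (-1) = gv cs i) :
    ∀ m, ((List.range' 1 m).foldl (aInner cs cs.length i) dp).length = cs.length + 1 ∧
      ∀ p, ((List.range' 1 m).foldl (aInner cs cs.length i) dp).getD p (-1) =
        if i + 1 ≤ p ∧ p ≤ i + m ∧ p ≤ cs.length ∧ (cs.getD (p - 1) ' ').toNat % 2 = 1
        then combineMin (dp.getD p (-1)) (1 + gv cs i) else dp.getD p (-1) := by
  intro m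
  induction m with
  | zero =>
    refine ⟨hlen, fun p => ?_⟩
    rw [if_neg (by rintro ⟨h1, h2, -, -⟩; omega)]
    rfl
  | succ m ih =>
    obtain ⟨ihlen, ihget⟩ := ih
    have hstep : (List.range' 1 (m + 1)).foldl (aInner cs cs.length i) dp
        = aInner cs cs.length i ((List.range' 1 m).foldl (aInner cs cs.length i) dp) (m + 1) := by
      rw [List.range'_concat, List.foldl_append]
      simp only [List.foldl_cons, List.foldl_nil]
      congr 1
      omega
    set E := (List.range' 1 m).foldl (aInner cs cs.length i) dp with hE
    rw [hstep]
    unfold aInner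
    by_cases hbig : i + (m + 1) > cs.length
    · rw [if_pos hbig]
      refine ⟨ihlen, fun p => ?_⟩
      rw [ihget p]
      by_cases hp : p = i + (m + 1)
      · rw [if_neg (by rintro ⟨-, h, -, -⟩; omega), if_neg (by rintro ⟨-, -, h, -⟩; omega)]
      · exact if_shift _ _ _ _ _ _ _ hp
    · rw [if_neg hbig]
      have hb2 : i + (m + 1) ≤ cs.length := by omega
      have hco := checkOdd_slice cs i (i + (m + 1)) (by omega) hb2
      have hEi : E.getD i (-1) = gv cs i := by
        rw [ihget i, if_neg (by rintro ⟨h, -⟩; omega)]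
        exact hgvi
      have hEp : E.getD (i + (m + 1)) (-1) = dp.getD (i + (m + 1)) (-1) := by
        rw [ihget _, if_neg (by rintro ⟨-, h, -⟩; omega)]
      by_cases ho : (cs.getD (i + (m + 1) - 1) ' ').toNat % 2 = 1
      · rw [hco, if_pos ho, if_pos (show (1 : Int) ≠ 0 by decide)]
        have hset : (if E.getD (i + (m + 1)) (-1) = -1
              then E.set (i + (m + 1)) (1 + E.getD i (-1))
              else E.set (i + (m + 1)) (min (E.getD (i + (m + 1)) (-1)) (1 + E.getD i (-1))))
            = E.set (i + (m + 1)) (combineMin (E.getD (i + (m + 1)) (-1)) (1 + E.getD i (-1))) := by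
          unfold combineMin
          split_ifs <;> rfl
        rw [hset]
        refine ⟨by rw [List.length_set]; exact ihlen, fun p => ?_⟩
        by_cases hp : p = i + (m + 1)
        · subst hp
          rw [getD_set_self _ _ _ _ (by rw [ihlen]; omega), hEi, hEp,
            if_pos ⟨by omega, by omega, hb2, ho⟩]
        · rw [getD_set_other _ _ _ _ _ (fun hh => hp hh.symm), ihget p]
          exact if_shift _ _ _ _ _ _ _ hp
      · rw [hco, if_neg ho, if_neg (show ¬((0 : Int) ≠ 0) by decide)]
        refine ⟨ihlen, fun p => ?_⟩
        rw [ihget p]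
        by_cases hp : p = i + (m + 1)
        · subst hp
          rw [if_neg (by rintro ⟨-, h, -, -⟩; omega), if_neg (by rintro ⟨-, -, -, h⟩; exact ho h)]
        · exact if_shift _ _ _ _ _ _ _ hp

-- the invariant of A's outer loop
theorem aInv (cs : List Char) (k : Nat) (hk : k ≤ cs.length) :
    ((List.range' 1 k).foldl (aStep cs cs.length)
        ((List.range (cs.length + 1)).map (fun _ => (-1 : Int)))).length = cs.length + 1 ∧
    (∀ p, 1 ≤ p → p ≤ k →
      ((List.range' 1 k).foldl (aStep cs cs.length)
          ((List.range (cs.length + 1)).map (fun _ => (-1 : Int)))).getD p (-1) = gv cs p) ∧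
    (∀ p, k < p → p ≤ cs.length →
      ((List.range' 1 k).foldl (aStep cs cs.length)
          ((List.range (cs.length + 1)).map (fun _ => (-1 : Int)))).getD p (-1) =
        (if (cs.getD (p - 1) ' ').toNat % 2 = 1 then mfold (candA cs k p) else -1)) := by
  revert hk
  induction k with
  | zero =>
    intro hk
    refine ⟨by simp, fun p hp1 hp2 => by omega, fun p hp1 hp2 => ?_⟩
    show ((List.range (cs.length + 1)).map (fun _ => (-1 : Int))).getD p (-1) = _
    rw [dp0_getD]
    split_ifs <;> rfl
  | succ k ih =>
    intro hk
    obtain ⟨ihlen, ih2, ih3⟩ := ih (by omega)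
    have hstep : (List.range' 1 (k + 1)).foldl (aStep cs cs.length)
          ((List.range (cs.length + 1)).map (fun _ => (-1 : Int)))
        = aStep cs cs.length ((List.range' 1 k).foldl (aStep cs cs.length)
            ((List.range (cs.length + 1)).map (fun _ => (-1 : Int)))) (k + 1) := by
      rw [List.range'_concat, List.foldl_append]
      simp only [List.foldl_cons, List.foldl_nil]
      congr 1
      omega
    set D := (List.range' 1 k).foldl (aStep cs cs.length)
      ((List.range (cs.length + 1)).map (fun _ => (-1 : Int))) with hD
    rw [hstep]
    have hco0 : checkOdd (PySem.List.slice cs (some (0 : Int)) (some ((k + 1 : Nat) : Int)))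
        = (if (cs.getD (k + 1 - 1) ' ').toNat % 2 = 1 then 1 else 0) := by
      have h := checkOdd_slice cs 0 (k + 1) (by omega) hk
      rw [Nat.cast_zero] at h
      exact h
    simp only [aStep]
    rw [hco0]
    set D1 := if k + 1 ≤ 9 ∧ (if (cs.getD (k + 1 - 1) ' ').toNat % 2 = 1 then (1 : Int) else 0) > 0
        then D.set (k + 1) 1 else D with hD1def
    have hD1len : D1.length = cs.length + 1 := by
      rw [hD1def]; split_ifs <;> simp [List.length_set, ihlen]
    have hD1other : ∀ p, p ≠ k + 1 → D1.getD p (-1) = D.getD p (-1) := by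
      intro p hp
      rw [hD1def]
      split_ifs <;> first | exact getD_set_other _ _ _ _ _ (Ne.symm hp) | rfl
    have hD1at : D1.getD (k + 1) (-1) = gv cs (k + 1) := by
      by_cases ho : (cs.getD (k + 1 - 1) ' ').toNat % 2 = 1
      · by_cases h9 : k + 1 ≤ 9
        · rw [hD1def, if_pos ⟨h9, by rw [if_pos ho]; decide⟩,
            getD_set_self _ _ _ _ (by rw [ihlen]; omega)]
          exact (gv_odd_small cs (k + 1) (by omega) h9 ho).symm
        · rw [hD1def, if_neg (by rintro ⟨h, -⟩; omega)]
          rw [ih3 (k + 1) (by omega) hk, if_pos ho]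
          have hgl := gv_odd_large cs (k + 1) (by omega) ho
          simp only [Nat.add_sub_cancel] at hgl
          exact hgl.symm
      · rw [hD1def, if_neg (by rintro ⟨-, hgt⟩; rw [if_neg ho] at hgt; omega)]
        rw [ih3 (k + 1) (by omega) hk, if_neg ho]
        exact (gv_not_odd cs (k + 1) (by omega) ho).symm
    by_cases hg : gv cs (k + 1) = -1
    · rw [if_neg (by rw [hD1at]; exact fun hcon => hcon hg)]
      refine ⟨hD1len, fun p hp1 hp2 => ?_, fun p hp1 hp2 => ?_⟩
      · by_cases hpk : p = k + 1
        · subst hpk; rw [hD1at]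
        · rw [hD1other p hpk]; exact ih2 p hp1 (by omega)
      · rw [hD1other p (by omega), ih3 p (by omega) hp2]
        by_cases hop : (cs.getD (p - 1) ' ').toNat % 2 = 1
        · rw [if_pos hop, if_pos hop, candA_succ,
            if_neg (by rintro ⟨-, hne⟩; exact hne hg), List.append_nil]
        · rw [if_neg hop, if_neg hop]
    · rw [if_pos (by rw [hD1at]; exact hg)]
      obtain ⟨jlen, jget⟩ := innerLoop cs (k + 1) D1 hD1len (by omega) hD1at 9
      refine ⟨jlen, fun p hp1 hp2 => ?_, fun p hp1 hp2 => ?_⟩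
      · rw [jget p, if_neg (by rintro ⟨h, -⟩; omega)]
        by_cases hpk : p = k + 1
        · subst hpk; exact hD1at
        · rw [hD1other p hpk]; exact ih2 p hp1 (by omega)
      · by_cases hop : (cs.getD (p - 1) ' ').toNat % 2 = 1
        · by_cases hle : p ≤ k + 1 + 9
          · rw [jget p, if_pos ⟨by omega, hle, hp2, hop⟩, hD1other p (by omega),
              ih3 p (by omega) hp2, if_pos hop, if_pos hop, candA_succ,
              if_pos ⟨hle, hg⟩, mfold_append]
            congr 1
            omega
          · rw [jget p, if_neg (by rintro ⟨-, h, -⟩; omega), hD1other p (by omega),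
              ih3 p (by omega) hp2, if_pos hop, if_pos hop, candA_succ,
              if_neg (by rintro ⟨h, -⟩; omega), List.append_nil]
        · rw [jget p, if_neg (by rintro ⟨-, -, -, h⟩; exact hop h), hD1other p (by omega),
            ih3 p (by omega) hp2, if_neg hop, if_neg hop]

-- ---- Part 2: gv is the minimal number of jumps, and the greedy loop computes it ----

-- p is reachable from 0 in exactly k jumps, each landing on an odd-code position
-- at distance 1..9
inductive Reach (cs : List Char) : Nat → Nat → Prop
  | zero : Reach cs 0 0
  | step {k q p : Nat} : Reach cs k q → q < p → p ≤ q + 9 →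
      (cs.getD (p - 1) ' ').toNat % 2 = 1 → Reach cs (k + 1) p

lemma reach_le_len (cs : List Char) {k p : Nat} (h : Reach cs k p) : p ≤ cs.length := by
  cases h with
  | zero => exact Nat.zero_le _
  | step hq hlt hle hodd =>
    by_contra hgt
    rw [List.getD_eq_default _ _ (by omega)] at hodd
    simp at hodd

lemma reach_zero (cs : List Char) {p : Nat} (h : Reach cs 0 p) : p = 0 := by
  cases h; rfl

-- gv is an upper bound along any jump chain
lemma reach_gv (cs : List Char) : ∀ {k p : Nat}, Reach cs k p → gv cs p ≠ -1 ∧ gv cs p ≤ k := by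
  intro k p h
  induction h with
  | zero => rw [gv_zero]; exact ⟨by decide, by decide⟩
  | @step k q p hq hlt hle hodd ih =>
    obtain ⟨hne, hk⟩ := ih
    obtain ⟨p', rfl⟩ : ∃ p', p = p' + 1 := ⟨p - 1, by omega⟩
    have hmem : gv cs q ∈ candsB cs p' :=
      (mem_candsB cs p' _).mpr ⟨q, by omega, by omega, hne, rfl⟩
    cases hmin : PySem.List.min? (candsB cs p') (fun y => y) with
    | none =>
      rw [(PySem.List.min?_eq_none_iff _ _).mp hmin] at hmem
      cases hmem
    | some m =>
      have hgveq : gv cs (p' + 1) = m + 1 := by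
        rw [gv_succ, bVal_gvl, if_pos hodd, hmin]
      have hmle := PySem.List.min?_isMin hmin _ hmem
      have hm0 : 0 ≤ m := by
        obtain ⟨q', _, _, hne', hq'⟩ := (mem_candsB cs p' m).mp (PySem.List.min?_mem hmin)
        rcases gv_cases cs q' with h' | ⟨h', _⟩
        · exact absurd h' hne'
        · omega
      rw [hgveq]
      exact ⟨by omega, by push_cast; omega⟩

-- gv is realized by some jump chain
lemma gv_reach (cs : List Char) : ∀ p, gv cs p ≠ -1 → Reach cs (gv cs p).toNat p := by
  intro p
  induction p using Nat.strong_induction_on with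
  | _ p ih =>
    match p with
    | 0 => intro _; rw [gv_zero]; exact Reach.zero
    | k + 1 =>
      intro hne
      by_cases ho : (cs.getD (k + 1 - 1) ' ').toNat % 2 = 1
      · cases hmin : PySem.List.min? (candsB cs k) (fun y => y) with
        | none =>
          have hz : gv cs (k + 1) = -1 := by
            rw [gv_succ, bVal_gvl, if_pos ho, hmin]
          exact absurd hz hne
        | some m =>
          have hgveq : gv cs (k + 1) = m + 1 := by
            rw [gv_succ, bVal_gvl, if_pos ho, hmin]
          obtain ⟨q, hq1, hq2, hne', hmq⟩ := (mem_candsB cs k m).mp (PySem.List.min?_mem hmin)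
          have hr := ih q (by omega) hne'
          have hm0 : 0 ≤ gv cs q := by
            rcases gv_cases cs q with h' | ⟨h', _⟩
            · exact absurd h' hne'
            · exact h'
          have htn : (gv cs (k + 1)).toNat = (gv cs q).toNat + 1 := by
            rw [hgveq, hmq]; omega
          rw [htn]
          exact Reach.step hr (by omega) (by omega) ho
      · exact absurd (gv_not_odd cs (k + 1) (by omega) ho) hne

-- the window maximum computed by bestStep: its two defining properties
lemma bestStep_spec (cs : List Char) (cur n : Nat) (hcn : cur < n) :
    (bestStep cs cur n = cur ∨
      ((cs.getD (bestStep cs cur n - 1) ' ').toNat % 2 = 1 ∧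
        cur + 1 ≤ bestStep cs cur n ∧ bestStep cs cur n ≤ min (cur + 9) n)) ∧
    (∀ p, cur + 1 ≤ p → p ≤ min (cur + 9) n → (cs.getD (p - 1) ' ').toNat % 2 = 1 →
      p ≤ bestStep cs cur n) := by
  have key : ∀ m, ((List.range' (cur + 1) m).foldl (pickOdd cs) cur = cur ∨
      ((cs.getD ((List.range' (cur + 1) m).foldl (pickOdd cs) cur - 1) ' ').toNat % 2 = 1 ∧
        cur + 1 ≤ (List.range' (cur + 1) m).foldl (pickOdd cs) cur ∧
        (List.range' (cur + 1) m).foldl (pickOdd cs) cur ≤ cur + m)) ∧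
      (∀ p, cur + 1 ≤ p → p ≤ cur + m → (cs.getD (p - 1) ' ').toNat % 2 = 1 →
        p ≤ (List.range' (cur + 1) m).foldl (pickOdd cs) cur) := by
    intro m
    induction m with
    | zero => exact ⟨Or.inl rfl, fun p h1 h2 _ => by omega⟩
    | succ m ih =>
      obtain ⟨ih1, ih2⟩ := ih
      have hstep : (List.range' (cur + 1) (m + 1)).foldl (pickOdd cs) cur
          = pickOdd cs ((List.range' (cur + 1) m).foldl (pickOdd cs) cur) (cur + 1 + m) := by
        rw [List.range'_concat, List.foldl_append]
        simp only [List.foldl_cons, List.foldl_nil, Nat.one_mul]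
      have hpo : ∀ b : Nat, pickOdd cs b (cur + 1 + m)
          = if (cs.getD (cur + 1 + m - 1) ' ').toNat % 2 = 1 then cur + 1 + m else b :=
        fun b => rfl
      rw [hstep, hpo]
      by_cases ho : (cs.getD (cur + 1 + m - 1) ' ').toNat % 2 = 1
      · rw [if_pos ho]
        constructor
        · exact Or.inr ⟨ho, by omega, by omega⟩
        · intro p h1 h2 hodd
          by_cases hpe : p = cur + 1 + m
          · omega
          · have := ih2 p h1 (by omega) hodd
            rcases ih1 with h | ⟨_, _, _⟩ <;> omega
      · rw [if_neg ho]
        constructor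
        · rcases ih1 with h | ⟨a, b, c⟩
          · exact Or.inl h
          · exact Or.inr ⟨a, b, by omega⟩
        · intro p h1 h2 hodd
          have hpe : p ≠ cur + 1 + m := by rintro rfl; exact ho hodd
          exact ih2 p h1 (by omega) hodd
  have hm : cur + (min (cur + 9) n - cur) = min (cur + 9) n := by omega
  obtain ⟨k1, k2⟩ := key (min (cur + 9) n - cur)
  rw [hm] at k1 k2
  exact ⟨k1, k2⟩

-- the greedy while-loop computes gv at position cs.length
lemma gloop_correct (cs : List Char) : ∀ fuel cur steps, cs.length - cur ≤ fuel →
    cur ≤ cs.length → Reach cs steps cur →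
    (∀ k p, Reach cs k p → (k ≤ steps → p ≤ cur) ∧ (k < steps → p < cur)) →
    gloop cs cs.length cur steps = gv cs cs.length := by
  intro fuel
  induction fuel with
  | zero =>
    intro cur steps hf hcn hr hmax
    have hcur : cur = cs.length := by omega
    subst hcur
    rw [gloop, dif_neg (by omega)]
    obtain ⟨hne, hle⟩ := reach_gv cs hr
    have hrr := gv_reach cs cs.length hne
    have := (hmax _ _ hrr).2
    have h0 : 0 ≤ gv cs cs.length := by
      rcases gv_cases cs cs.length with h' | ⟨h', _⟩
      · exact absurd h' hne
      · exact h'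
    omega
  | succ fuel ih =>
    intro cur steps hf hcn hr hmax
    rw [gloop]
    by_cases hlt : cur < cs.length
    · rw [dif_pos hlt]
      obtain ⟨hb1, hb2⟩ := bestStep_spec cs cur cs.length hlt
      by_cases hstuck : bestStep cs cur cs.length = cur
      · rw [dif_pos hstuck]
        -- nothing beyond cur is ever reachable, so cs.length is unreachable
        have hall : ∀ k p, Reach cs k p → p ≤ cur := by
          intro k p h
          induction h with
          | zero => exact Nat.zero_le _
          | @step k q p hq hqlt hqle hodd ihq =>
            by_contra hgt
            have hpn : p ≤ cs.length := reach_le_len cs (Reach.step hq hqlt hqle hodd)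
            have := hb2 p (by omega) (by omega) hodd
            omega
        by_cases hne : gv cs cs.length = -1
        · rw [hne]
        · have := hall _ _ (gv_reach cs cs.length hne)
          omega
      · rw [dif_neg hstuck]
        rcases hb1 with h | ⟨hodd, hge, hle⟩
        · exact absurd h hstuck
        · apply ih _ (steps + 1) (by omega) (by omega)
          · exact Reach.step hr (by omega) (by omega) hodd
          · intro k p h
            constructor
            · intro hk
              by_cases hke : k = steps + 1
              · subst hke
                cases h with
                | step hq hqlt hqle hodd' =>
                  have hqc := (hmax _ _ hq).1 le_rfl
                  by_cases hpc : p ≤ cur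
                  · omega
                  · have hpn : p ≤ cs.length :=
                      reach_le_len cs (Reach.step ‹Reach cs steps _› ‹_ < p› ‹p ≤ _ + 9› hodd')
                    exact hb2 p (by omega) (by omega) hodd'
              · have := (hmax _ _ h).1 (by omega)
                omega
            · intro hk
              have := (hmax _ _ h).1 (by omega)
              omega
    · rw [dif_neg hlt]
      have hcur : cur = cs.length := by omega
      subst hcur
      obtain ⟨hne, hle⟩ := reach_gv cs hr
      have hrr := gv_reach cs cs.length hne
      have := (hmax _ _ hrr).2
      have h0 : 0 ≤ gv cs cs.length := by
        rcases gv_cases cs cs.length with h' | ⟨h', _⟩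
        · exact absurd h' hne
        · exact h'
      omega

-- ===== VERDICT (by name: the statement is the Claim_ definition above) =====
theorem splitIntoOdds_spec : Claim_equal_splitIntoOdds := by
  intro number _
  unfold Spec_splitIntoOdds
  set cs := number.toList with hcs
  by_cases hn : cs.length = 0
  · -- empty string: both sides return -1
    have hnil : cs = [] := List.length_eq_zero_iff.mp hn
    show splitIntoOdds number = splitIntoOdds_alt number
    simp [splitIntoOdds, splitIntoOdds_alt, ← hcs, hnil]
  · have hn1 : 1 ≤ cs.length := by omega
    obtain ⟨hlen, h2, h3⟩ := aInv cs cs.length le_rfl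
    have hA : splitIntoOdds number
        = ((List.range' 1 cs.length).foldl (aStep cs cs.length)
            ((List.range (cs.length + 1)).map (fun _ => (-1 : Int)))).getD
            cs.length (-1) := rfl
    have hAgv : splitIntoOdds number = gv cs cs.length := by
      rw [hA]; exact h2 _ hn1 le_rfl
    by_cases ho : (cs.getD (cs.length - 1) ' ').toNat % 2 = 1
    · -- odd last character: B runs the greedy loop
      have hB : splitIntoOdds_alt number = gloop cs cs.length 0 0 := by
        show (if cs.length = 0 ∨ (cs.getD (cs.length - 1) ' ').toNat % 2 = 0 then (-1 : Int)
              else gloop cs cs.length 0 0) = _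
        rw [if_neg (by omega)]
      rw [hAgv, hB]
      refine (gloop_correct cs cs.length 0 0 (by omega) (by omega) Reach.zero ?_).symm
      intro k p h
      constructor
      · intro hk
        have hk0 : k = 0 := by omega
        subst hk0
        rw [reach_zero cs h]
      · intro hk
        omega
    · -- even last character: the string is unsplittable, both return -1
      have hB : splitIntoOdds_alt number = -1 := by
        show (if cs.length = 0 ∨ (cs.getD (cs.length - 1) ' ').toNat % 2 = 0 then (-1 : Int)
              else gloop cs cs.length 0 0) = _
        rw [if_pos (Or.inr (by omega))]
      rw [hAgv, hB]
      exact gv_not_odd cs cs.length hn1 ho
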